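-- pv_equiv track=rewrite | github.com/SiMeGH/EduLabs | lesson_3/L3_A16.py | create_id_product_list
-- ===== SOURCE A (Python) =====
-- def sum_digits(num):
--     d_sum = 0
--     while num > 0:
--         digit = num % 10
--         d_sum += digit
--         num //= 10
--     return d_sum
--
-- def create_id_product_list(list_):
--     product_list = []
--     for i, digit in enumerate(list_):
--         if i % 2 == 1:
--             new_num = digit * 2
--             while new_num > 9:
--                 new_num = sum_digits(new_num)
--             product_list.append(new_num)
--         else:
--             product_list.append(digit)
--     return product_list
-- ===== SOURCE B (Python) =====
-- def create_id_product_list(list_):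
--     return [d if i % 2 == 0 else (d * 2 if d * 2 <= 9 else 1 + (d * 2 - 1) % 9)
--             for i, d in enumerate(list_)]
-- ===== Notes on version B (the rewrite author's own statement) =====
-- stated objective: simpler
-- what changed: Replaced the sum_digits helper and its nested while-loops by a single map over enumerate using the closed-form digital root 1 + (d*2-1) % 9 for odd indices.
import Mathlib
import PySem

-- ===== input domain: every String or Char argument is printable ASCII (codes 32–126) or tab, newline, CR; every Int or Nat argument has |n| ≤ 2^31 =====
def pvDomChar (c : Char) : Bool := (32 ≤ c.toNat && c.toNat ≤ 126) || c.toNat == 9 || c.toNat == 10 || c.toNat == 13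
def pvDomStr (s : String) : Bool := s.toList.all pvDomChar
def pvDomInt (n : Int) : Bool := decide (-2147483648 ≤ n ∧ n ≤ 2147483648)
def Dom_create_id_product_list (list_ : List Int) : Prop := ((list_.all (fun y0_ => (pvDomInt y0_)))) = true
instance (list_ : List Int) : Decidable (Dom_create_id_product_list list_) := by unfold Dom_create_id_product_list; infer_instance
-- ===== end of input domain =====

-- B replaces the helper/while-loop digit-sum reduction by a one-pass map with the
-- closed-form digital root 1 + (d-1) % 9 (objective: simpler).


-- ===== PORT A =====

theorem pv_ediv10_lt (a : Int) (h : 0 < a) : a / 10 < a := by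
  rw [Int.ediv_lt_iff_lt_mul (by decide)]
  exact lt_mul_right h (by decide)

theorem pv_toNat_dec (a b : Int) (hb : 0 < b) (hab : a < b) : a.toNat < b.toNat :=
  (Int.toNat_lt_toNat hb).mpr hab

-- while num > 0: digit = num % 10; d_sum += digit; num //= 10
def sum_digits_loop (num d_sum : Int) : Int :=
  if 0 < num then
    sum_digits_loop (PySem.Int.floordiv num 10) (d_sum + PySem.Int.mod num 10)
  else d_sum
termination_by num.toNat
decreasing_by
  rename_i h
  rw [PySem.Int.floordiv_eq_ediv_of_pos (by decide)]
  exact pv_toNat_dec _ _ h (pv_ediv10_lt num h)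

def sum_digits (num : Int) : Int := sum_digits_loop num 0

-- bounds on the digit sum, needed by the outer while-loop's termination proof
theorem pv_sdl_le : ∀ (k : Nat) (num acc : Int), num.toNat ≤ k → 0 ≤ num →
    sum_digits_loop num acc ≤ acc + num := by
  intro k
  induction k with
  | zero =>
    intro num acc hk h0
    have hz : num = 0 := le_antisymm (Int.toNat_eq_zero.mp (Nat.le_zero.mp hk)) h0
    rw [sum_digits_loop, if_neg (by rw [hz]; exact lt_irrefl 0), hz, add_zero]
  | succ k ih =>
    intro num acc hk h0
    by_cases hp : 0 < num
    · rw [sum_digits_loop, if_pos hp,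
        PySem.Int.floordiv_eq_ediv_of_pos (by decide),
        PySem.Int.mod_eq_emod_of_pos (by decide)]
      have hq0 : 0 ≤ num / 10 := Int.ediv_nonneg h0 (by decide)
      have hqk : (num / 10).toNat ≤ k :=
        Nat.lt_succ_iff.mp (Nat.lt_of_lt_of_le (pv_toNat_dec _ _ hp (pv_ediv10_lt num hp)) hk)
      refine le_trans (ih (num / 10) (acc + num % 10) hqk hq0) ?_
      have h9 : num / 10 ≤ 10 * (num / 10) := le_mul_of_one_le_left hq0 (by decide)
      have hsum : num % 10 + num / 10 ≤ num :=
        calc num % 10 + num / 10 ≤ num % 10 + 10 * (num / 10) := add_le_add (le_refl _) h9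
          _ = 10 * (num / 10) + num % 10 := add_comm _ _
          _ = num := Int.mul_ediv_add_emod num 10
      calc acc + num % 10 + num / 10 = acc + (num % 10 + num / 10) := add_assoc _ _ _
        _ ≤ acc + num := add_le_add (le_refl acc) hsum
    · rw [sum_digits_loop, if_neg hp]
      have hz : num = 0 := le_antisymm (not_lt.mp hp) h0
      rw [hz, add_zero]

theorem pv_sum_digits_lt (n : Int) (h : 9 < n) : sum_digits n ≤ n - 9 := by
  have h0 : (0:Int) < n := lt_trans (by decide) h
  have h10 : (10:Int) ≤ n := by
    have := Int.add_one_le_iff.mpr h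
    rwa [show (9:Int) + 1 = 10 by decide] at this
  unfold sum_digits
  rw [sum_digits_loop, if_pos h0,
    PySem.Int.floordiv_eq_ediv_of_pos (by decide),
    PySem.Int.mod_eq_emod_of_pos (by decide)]
  have hq1 : 1 ≤ n / 10 := by
    rw [Int.le_ediv_iff_mul_le (by decide)]; simpa using h10
  have hle := pv_sdl_le (n / 10).toNat (n / 10) (0 + n % 10) (le_refl _)
    (Int.ediv_nonneg (le_of_lt h0) (by decide))
  refine le_trans hle ?_
  have h9q : (9:Int) ≤ 9 * (n / 10) :=
    calc (9:Int) = 9 * 1 := by decide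
      _ ≤ 9 * (n / 10) := mul_le_mul_of_nonneg_left hq1 (by decide)
  have hmain : n % 10 + n / 10 + 9 ≤ n :=
    calc n % 10 + n / 10 + 9 ≤ n % 10 + n / 10 + 9 * (n / 10) := add_le_add (le_refl _) h9q
      _ = n % 10 + 10 * (n / 10) := by ring
      _ = 10 * (n / 10) + n % 10 := add_comm _ _
      _ = n := Int.mul_ediv_add_emod n 10
  calc 0 + n % 10 + n / 10 = n % 10 + n / 10 := by rw [zero_add]
    _ ≤ n - 9 := le_sub_iff_add_le.mpr hmain

-- while new_num > 9: new_num = sum_digits(new_num)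
def reduce_loop (new_num : Int) : Int :=
  if 9 < new_num then reduce_loop (sum_digits new_num) else new_num
termination_by new_num.toNat
decreasing_by
  rename_i h
  exact pv_toNat_dec _ _ (lt_trans (by decide) h)
    (lt_of_le_of_lt (pv_sum_digits_lt new_num h) (sub_lt_self new_num (by decide)))

def create_id_product_list (list_ : List Int) : List Int :=
  (PySem.List.enumerate list_ 0).foldl
    (fun product_list p =>
      if PySem.Int.mod p.1 2 == 1 then product_list ++ [reduce_loop (p.2 * 2)]
      else product_list ++ [p.2]) []

-- ===== PORT B =====
def create_id_product_list_alt (list_ : List Int) : List Int :=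
  (PySem.List.enumerate list_ 0).map
    (fun p =>
      if PySem.Int.mod p.1 2 == 0 then p.2
      else if p.2 * 2 ≤ 9 then p.2 * 2 else 1 + PySem.Int.mod (p.2 * 2 - 1) 9)

-- ===== PRECONDITION & SPEC =====
def Spec_create_id_product_list (list_ : List Int) (out : List Int) : Prop := out = create_id_product_list_alt list_
instance (list_ : List Int) (out : List Int) : Decidable (Spec_create_id_product_list list_ out) := by unfold Spec_create_id_product_list; infer_instance

-- ===== CLAIM (what is proved, stated in full; the proofs are below) =====
def Claim_equal_create_id_product_list : Prop := ∀ (list_ : List Int), Dom_create_id_product_list list_ → Spec_create_id_product_list list_ (create_id_product_list list_)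

-- ===== LEMMAS AND PROOFS =====

theorem pv_sdl_pos : ∀ (k : Nat) (num acc : Int), num.toNat ≤ k → 0 < num →
    acc + 1 ≤ sum_digits_loop num acc := by
  intro k
  induction k with
  | zero =>
    intro num acc hk h0
    exact absurd (Int.toNat_eq_zero.mp (Nat.le_zero.mp hk)) (not_le.mpr h0)
  | succ k ih =>
    intro num acc hk h0
    rw [sum_digits_loop, if_pos h0,
      PySem.Int.floordiv_eq_ediv_of_pos (by decide),
      PySem.Int.mod_eq_emod_of_pos (by decide)]
    have hr0 : 0 ≤ num % 10 := Int.emod_nonneg num (by decide)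
    by_cases hq : 0 < num / 10
    · have hqk : (num / 10).toNat ≤ k :=
        Nat.lt_succ_iff.mp (Nat.lt_of_lt_of_le (pv_toNat_dec _ _ h0 (pv_ediv10_lt num h0)) hk)
      refine le_trans ?_ (ih (num / 10) (acc + num % 10) hqk hq)
      exact add_le_add (le_add_of_nonneg_right hr0) (le_refl 1)
    · have hq0 : num / 10 = 0 := le_antisymm (not_lt.mp hq) (Int.ediv_nonneg (le_of_lt h0) (by decide))
      rw [hq0, sum_digits_loop, if_neg (lt_irrefl 0)]
      have hrn : num % 10 = num := by
        have hd := Int.mul_ediv_add_emod num 10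
        rw [hq0] at hd; simpa using hd
      rw [hrn]
      have h1 : (1:Int) ≤ num := Int.add_one_le_iff.mpr h0
      exact add_le_add (le_refl acc) h1

theorem pv_sum_digits_pos (n : Int) (h : 0 < n) : 1 ≤ sum_digits n := by
  have hp := pv_sdl_pos n.toNat n 0 (le_refl _) h
  unfold sum_digits
  simpa using hp


theorem sdl_mod9 : ∀ (k : Nat) (num acc : Int), num.toNat ≤ k → 0 ≤ num →
    sum_digits_loop num acc % 9 = (acc + num) % 9 := by
  intro k
  induction k with
  | zero =>
    intro num acc hk h0
    have hnum : ¬ 0 < num := by omega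
    rw [sum_digits_loop, if_neg hnum]; omega
  | succ k ih =>
    intro num acc hk h0
    by_cases hp : 0 < num
    · rw [sum_digits_loop, if_pos hp,
        PySem.Int.floordiv_eq_ediv_of_pos (by norm_num : (0:Int) < 10),
        PySem.Int.mod_eq_emod_of_pos (by norm_num : (0:Int) < 10)]
      have h1 := ih (num / 10) (acc + num % 10) (by omega) (by omega)
      omega
    · rw [sum_digits_loop, if_neg hp]; omega

theorem sum_digits_mod9 (n : Int) (h : 0 ≤ n) : sum_digits n % 9 = n % 9 := by
  have := sdl_mod9 n.toNat n 0 (by omega) h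
  unfold sum_digits; omega

theorem reduce_loop_eq : ∀ (k : Nat) (n : Int), n.toNat ≤ k → 9 < n →
    reduce_loop n = 1 + (n - 1) % 9 := by
  intro k
  induction k with
  | zero => intro n hk h; omega
  | succ k ih =>
    intro n hk h
    rw [reduce_loop, if_pos h]
    have h1 := pv_sum_digits_lt n h
    have h2 := pv_sum_digits_pos n (by omega)
    have h3 := sum_digits_mod9 n (by omega)
    by_cases hs : 9 < sum_digits n
    · rw [ih (sum_digits n) (by omega) hs]
      omega
    · rw [reduce_loop, if_neg hs]
      omega

theorem elem_eq (i d : Int) :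
    (if PySem.Int.mod i 2 == 1 then reduce_loop (d * 2) else d)
    = (if PySem.Int.mod i 2 == 0 then d
       else if d * 2 ≤ 9 then d * 2 else 1 + PySem.Int.mod (d * 2 - 1) 9) := by
  rw [PySem.Int.mod_eq_emod_of_pos (by norm_num : (0:Int) < 2)]
  have h2 : i % 2 = 0 ∨ i % 2 = 1 := by omega
  rcases h2 with h2 | h2
  · simp [h2]
  · simp only [h2]
    norm_num
    by_cases hle : d * 2 ≤ 9
    · rw [reduce_loop, if_neg (by omega), if_pos hle]
    · rw [if_neg hle]
      exact reduce_loop_eq (d * 2).toNat (d * 2) (by omega) (by omega)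

theorem foldl_eq_map : ∀ (xs : List Int) (s : Int) (acc : List Int),
    (PySem.List.enumerate xs s).foldl
      (fun product_list p =>
        if PySem.Int.mod p.1 2 == 1 then product_list ++ [reduce_loop (p.2 * 2)]
        else product_list ++ [p.2]) acc
    = acc ++ (PySem.List.enumerate xs s).map
        (fun p =>
          if PySem.Int.mod p.1 2 == 0 then p.2
          else if p.2 * 2 ≤ 9 then p.2 * 2 else 1 + PySem.Int.mod (p.2 * 2 - 1) 9) := by
  intro xs
  induction xs with
  | nil => intro s acc; simp [PySem.List.enumerate_nil]
  | cons x xs ih =>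
    intro s acc
    rw [PySem.List.enumerate_cons, List.foldl_cons, List.map_cons]
    have step :
        (if PySem.Int.mod s 2 == 1 then acc ++ [reduce_loop (x * 2)] else acc ++ [x])
        = acc ++ [if PySem.Int.mod s 2 == 0 then x
                  else if x * 2 ≤ 9 then x * 2 else 1 + PySem.Int.mod (x * 2 - 1) 9] := by
      rw [← elem_eq s x]
      split <;> rfl
    simp only []
    rw [step, ih]
    simp

theorem pv_main (list_ : List Int) :
    create_id_product_list list_ = create_id_product_list_alt list_ := by
  unfold create_id_product_list create_id_product_list_alt
  rw [foldl_eq_map]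
  simp

-- ===== VERDICT (by name: the statement is the Claim_ definition above) =====
theorem create_id_product_list_spec : Claim_equal_create_id_product_list := by
  intro list_ _
  exact pv_main list_
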